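-- pv_equiv track=rewrite | github.com/hassanSaeedHassan/ocr | scripts/utils/json_utils.py | _auto_close
-- ===== SOURCE A (Python) =====
-- def _auto_close(txt: str) -> str:
--     stack, in_str, esc = [], False, False
--     for ch in txt:
--         if in_str:
--             if esc: esc = False
--             elif ch == "\\": esc = True
--             elif ch == '"': in_str = False
--         else:
--             if ch == '"': in_str = True
--             elif ch in "{[": stack.append(ch)
--             elif ch == "}" and stack and stack[-1] == "{": stack.pop()
--             elif ch == "]" and stack and stack[-1] == "[": stack.pop()
--     closers = {"{": "}", "[": "]"}
--     for opener in reversed(stack):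
--         txt += closers[opener]
--     return txt
-- ===== SOURCE B (Python) =====
-- def _strip_strings(txt):
--     # remove every JSON string literal (an unterminated one runs to end of text)
--     out = []
--     i, n = 0, len(txt)
--     while i < n:
--         c = txt[i]
--         if c == '"':
--             i += 1
--             while i < n:
--                 if txt[i] == '\\':
--                     i += 2
--                 elif txt[i] == '"':
--                     i += 1
--                     break
--                 else:
--                     i += 1
--         else:
--             out.append(c)
--             i += 1
--     return ''.join(out)
--
--
-- def _auto_close(txt: str) -> str:
--     stack = []
--     for ch in _strip_strings(txt):
--         if ch in '{[':
--             stack.append(ch)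
--         elif ch == '}' and stack and stack[-1] == '{':
--             stack.pop()
--         elif ch == ']' and stack and stack[-1] == '[':
--             stack.pop()
--     return txt + ''.join('}' if o == '{' else ']' for o in reversed(stack))
-- ===== Notes on version B (the rewrite author's own statement) =====
-- stated objective: alternative
-- what changed: Replaces A's single interleaved string/escape/bracket state machine with two separate passes: first strip every JSON string literal with an index-skipping scanner, then run a plain bracket-stack scan over the stripped text and append the closers to the original text.
import Mathlib
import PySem

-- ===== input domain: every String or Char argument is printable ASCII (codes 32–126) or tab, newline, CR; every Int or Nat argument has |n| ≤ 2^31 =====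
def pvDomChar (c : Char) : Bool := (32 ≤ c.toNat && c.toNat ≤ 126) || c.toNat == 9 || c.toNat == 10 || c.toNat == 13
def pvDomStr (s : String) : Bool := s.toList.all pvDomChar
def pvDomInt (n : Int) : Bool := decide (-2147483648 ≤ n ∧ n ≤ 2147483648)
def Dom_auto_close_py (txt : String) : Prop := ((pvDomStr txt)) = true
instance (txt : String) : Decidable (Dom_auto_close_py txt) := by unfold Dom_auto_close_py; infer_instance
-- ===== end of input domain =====

-- B replaces A's single interleaved string/escape/stack state machine by two passes
-- (strip string literals, then a plain bracket-stack scan); objective: simpler decomposition.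

-- ===== PORT A =====
-- one step of A's for-loop; state = (stack, in_str, esc)
def aStep (st : List Char × Bool × Bool) (ch : Char) : List Char × Bool × Bool :=
  let (stack, in_str, esc) := st
  if in_str then
    if esc then (stack, in_str, false)
    else if ch = '\\' then (stack, in_str, true)
    else if ch = '"' then (stack, false, esc)
    else (stack, in_str, esc)
  else
    if ch = '"' then (stack, true, esc)
    else if ch = '{' ∨ ch = '[' then (stack ++ [ch], in_str, esc)
    else if ch = '}' ∧ stack ≠ [] ∧ stack.getLast? = some '{' then (stack.dropLast, in_str, esc)
    else if ch = ']' ∧ stack ≠ [] ∧ stack.getLast? = some '[' then (stack.dropLast, in_str, esc)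
    else (stack, in_str, esc)

def auto_close_py (txt : String) : String :=
  let st := txt.toList.foldl aStep ([], false, false)
  -- closers = {"{": "}", "[": "]"}; the stack only ever holds '{' or '[', so the
  -- dict lookup closers[opener] is ported as this two-way test
  st.1.reverse.foldl (fun acc opener => acc.push (if opener = '{' then '}' else ']')) txt

-- ===== PORT B =====
-- port of Source B's inner while-loop: skip to just past the closing quote ('\\' skips 2 chars)
def skipStr : List Char → List Char
  | [] => []
  | c :: rest =>
    if c = '\\' then skipStr rest.tail
    else if c = '"' then rest
    else skipStr rest
termination_by l => l.length
decreasing_by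
  all_goals simp [List.length_tail]; try omega

theorem skipStr_length_le (l : List Char) : (skipStr l).length ≤ l.length := by
  fun_induction skipStr l <;> simp_all [List.length_tail] <;> omega

-- port of Source B's _strip_strings outer while-loop
def stripStrs : List Char → List Char
  | [] => []
  | c :: rest =>
    if c = '"' then stripStrs (skipStr rest)
    else c :: stripStrs rest
termination_by l => l.length
decreasing_by
  all_goals have := skipStr_length_le rest; simp; try omega

-- one step of Source B's bracket-stack for-loop
def bStep (stack : List Char) (ch : Char) : List Char :=
  if ch = '{' ∨ ch = '[' then stack ++ [ch]
  else if ch = '}' ∧ stack ≠ [] ∧ stack.getLast? = some '{' then stack.dropLast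
  else if ch = ']' ∧ stack ≠ [] ∧ stack.getLast? = some '[' then stack.dropLast
  else stack

def auto_close_py_alt (txt : String) : String :=
  let stack := (stripStrs txt.toList).foldl bStep []
  txt ++ String.ofList (stack.reverse.map (fun o => if o = '{' then '}' else ']'))

-- ===== PRECONDITION & SPEC =====
def Spec_auto_close_py (txt : String) (out : String) : Prop := out = auto_close_py_alt txt
instance (txt : String) (out : String) : Decidable (Spec_auto_close_py txt out) := by unfold Spec_auto_close_py; infer_instance

-- ===== CLAIM (what is proved, stated in full; the proofs are below) =====
def Claim_equal_auto_close_py : Prop := ∀ (txt : String), Dom_auto_close_py txt → Spec_auto_close_py txt (auto_close_py txt)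

-- ===== LEMMAS AND PROOFS =====

theorem aStep_notquote (stack : List Char) (ch : Char) (h : ch ≠ '"') :
    aStep (stack, false, false) ch = (bStep stack ch, false, false) := by
  simp only [aStep, bStep]
  split_ifs <;> simp_all

theorem aStep_quote_out (stack : List Char) :
    aStep (stack, false, false) '"' = (stack, true, false) := by
  simp [aStep]

theorem aStep_in_backslash (stack : List Char) :
    aStep (stack, true, false) '\\' = (stack, true, true) := by
  simp [aStep]

theorem aStep_in_esc (stack : List Char) (ch : Char) :
    aStep (stack, true, true) ch = (stack, true, false) := by
  simp [aStep]

theorem aStep_in_quote (stack : List Char) :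
    aStep (stack, true, false) '"' = (stack, false, false) := by
  simp [aStep]

theorem aStep_in_other (stack : List Char) (ch : Char) (h1 : ch ≠ '\\') (h2 : ch ≠ '"') :
    aStep (stack, true, false) ch = (stack, true, false) := by
  simp [aStep, h1, h2]

-- the simulation: A's interleaved fold equals B's fold over the stripped text,
-- both outside a string (claim 1) and just inside one (claim 2)
theorem simMain (n : Nat) : ∀ l : List Char, l.length ≤ n → ∀ stack : List Char,
    (l.foldl aStep (stack, false, false)).1 = (stripStrs l).foldl bStep stack
    ∧ (l.foldl aStep (stack, true, false)).1 = (stripStrs (skipStr l)).foldl bStep stack := by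
  induction n with
  | zero =>
    intro l hl stack
    have hnil : l = [] := List.eq_nil_of_length_eq_zero (Nat.le_zero.mp hl)
    subst hnil; simp [stripStrs, skipStr]
  | succ n ih =>
    intro l hl stack
    match l with
    | [] => simp [stripStrs, skipStr]
    | c :: rest =>
      have hr : rest.length ≤ n := by simpa using hl
      constructor
      · by_cases hc : c = '"'
        · subst hc
          rw [List.foldl_cons, aStep_quote_out]
          rw [(ih rest hr stack).2]
          simp [stripStrs]
        · rw [List.foldl_cons, aStep_notquote stack c hc]
          rw [(ih rest hr (bStep stack c)).1]
          simp [stripStrs, hc]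
      · by_cases hb : c = '\\'
        · subst hb
          rw [List.foldl_cons, aStep_in_backslash]
          cases rest with
          | nil => simp [skipStr, stripStrs]
          | cons d r =>
            have hrr : r.length ≤ n := by simp at hl; omega
            rw [List.foldl_cons, aStep_in_esc]
            rw [(ih r hrr stack).2]
            simp [skipStr]
        · by_cases hq : c = '"'
          · subst hq
            rw [List.foldl_cons, aStep_in_quote]
            rw [(ih rest hr stack).1]
            simp [skipStr]
          · rw [List.foldl_cons, aStep_in_other stack c hb hq]
            rw [(ih rest hr stack).2]
            simp [skipStr, hb, hq]

-- appending one char at a time equals appending the mapped list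
theorem push_fold (f : Char → Char) (l : List Char) (s : String) :
    l.foldl (fun acc o => acc.push (f o)) s = s ++ String.ofList (l.map f) := by
  induction l generalizing s with
  | nil => simp
  | cons c t ih =>
    rw [List.foldl_cons, ih]
    apply String.toList_inj.mp
    simp

-- ===== VERDICT (by name: the statement is the Claim_ definition above) =====
theorem auto_close_py_spec : Claim_equal_auto_close_py := by
  intro txt _
  unfold Spec_auto_close_py auto_close_py auto_close_py_alt
  dsimp only
  rw [(simMain txt.toList.length txt.toList (Nat.le_refl _) []).1]
  rw [push_fold]
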